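-- pv_equiv track=rewrite | github.com/drigoni/ConditionalCGVAE | histogramAnalysis/analysis.py | scoreToHist
-- ===== SOURCE A (Python) =====
-- def scoreToHist(score: int, length_hist: int, max_valence: int) -> list:
--     rem = list()
--     while score > 0:
--         rem.insert(0, score % (max_valence + 1))
--         score = score // (max_valence + 1)
--     while len(rem) < length_hist:
--         rem.insert(0, 0)
--     return rem
-- ===== SOURCE B (Python) =====
-- def scoreToHist(score: int, length_hist: int, max_valence: int) -> list:
--     base = max_valence + 1
--     n, ndigits = score, 0
--     while n > 0:
--         ndigits += 1
--         n //= base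
--     total = max(ndigits, length_hist)
--     s = max(score, 0)
--     return [0] * (total - ndigits) + [(s // base ** (ndigits - 1 - i)) % base for i in range(ndigits)]
-- ===== Notes on version B (the rewrite author's own statement) =====
-- stated objective: faster
-- what changed: Instead of building the digit list by chained quotient/remainder insertions at the front of a growing list plus a second front-insertion padding loop, B counts the digits once, allocates the zero padding in one step and extracts each digit directly from its place with (score // base**place) % base.
import Mathlib
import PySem

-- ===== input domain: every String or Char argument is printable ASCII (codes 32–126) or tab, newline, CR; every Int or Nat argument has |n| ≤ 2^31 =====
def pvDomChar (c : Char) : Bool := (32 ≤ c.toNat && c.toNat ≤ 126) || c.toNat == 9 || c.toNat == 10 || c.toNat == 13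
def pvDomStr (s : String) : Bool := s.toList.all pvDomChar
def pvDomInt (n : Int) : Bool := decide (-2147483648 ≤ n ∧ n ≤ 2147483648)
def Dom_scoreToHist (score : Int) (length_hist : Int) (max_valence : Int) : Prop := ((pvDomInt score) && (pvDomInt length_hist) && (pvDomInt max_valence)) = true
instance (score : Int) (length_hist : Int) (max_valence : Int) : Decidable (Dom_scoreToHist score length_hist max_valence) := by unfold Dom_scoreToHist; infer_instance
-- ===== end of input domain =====

-- B replaces A's chained quotient/remainder front-insertions and front-insertion padding loop by a
-- digit-count pass, one-step zero padding and positional extraction (score // base**place) % base.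


-- ===== PORT A =====
-- first while loop: rem.insert(0, score % base); score //= base.  Fuel score.toNat suffices on Pre_
-- (base ≥ 2 makes score strictly decrease); on excluded inputs the Python diverges or raises.
def pvALoop1 : Nat → Int → Int → List Int → List Int
  | 0, _, _, rem => rem
  | fuel+1, score, base, rem =>
    if score > 0 then
      pvALoop1 fuel (PySem.Int.floordiv score base) base (PySem.Int.mod score base :: rem)
    else rem

-- second while loop: while len(rem) < length_hist: rem.insert(0, 0)
def pvALoop2 (length_hist : Int) (rem : List Int) : List Int :=
  if (rem.length : Int) < length_hist then pvALoop2 length_hist (0 :: rem) else rem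
  termination_by (length_hist - rem.length).toNat
  decreasing_by simp; omega

def scoreToHist (score : Int) (length_hist : Int) (max_valence : Int) : List Int :=
  pvALoop2 length_hist (pvALoop1 score.toNat score (max_valence + 1) [])

-- ===== PORT B =====
-- counting pass: while n > 0: ndigits += 1; n //= base   (same fuel remark as for A's loop)
def pvBCount : Nat → Int → Int → Int
  | 0, _, _ => 0
  | fuel+1, n, base =>
    if n > 0 then 1 + pvBCount fuel (PySem.Int.floordiv n base) base else 0

def scoreToHist_alt (score : Int) (length_hist : Int) (max_valence : Int) : List Int :=
  let base := max_valence + 1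
  let ndigits := pvBCount score.toNat score base
  let total := max ndigits length_hist
  let s := max score 0
  -- [0] * (total - ndigits): empty for a non-positive count, so .toNat is exact;
  -- base ** (ndigits - 1 - i): for i in range(ndigits) the exponent is ≥ 0, so ^ over .toNat is exact
  List.replicate (total - ndigits).toNat 0 ++
    (PySem.List.pyRange 0 ndigits 1).map
      (fun i => PySem.Int.mod (PySem.Int.floordiv s (base ^ (ndigits - 1 - i).toNat)) base)

-- ===== PRECONDITION & SPEC =====
-- Pre_ excludes only the inputs on which A never returns: positive score with base
-- max_valence+1 = 0 (A raises ZeroDivisionError) or base = 1 (A's quotient loop never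
-- terminates; B diverges there too).  Everywhere A returns, the claim covers it.
def Pre_scoreToHist (score : Int) (length_hist : Int) (max_valence : Int) : Prop :=
  score ≤ 0 ∨ (max_valence ≠ -1 ∧ max_valence ≠ 0)
instance (score : Int) (length_hist : Int) (max_valence : Int) : Decidable (Pre_scoreToHist score length_hist max_valence) := by unfold Pre_scoreToHist; infer_instance

def pvWitness_scoreToHist : Int × Int × Int := (10, 3, 4)

def Spec_scoreToHist (score : Int) (length_hist : Int) (max_valence : Int) (out : List Int) : Prop := out = scoreToHist_alt score length_hist max_valence
instance (score : Int) (length_hist : Int) (max_valence : Int) (out : List Int) : Decidable (Spec_scoreToHist score length_hist max_valence out) := by unfold Spec_scoreToHist; infer_instance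

-- ===== CLAIM (what is proved, stated in full; the proofs are below) =====
def Claim_equal_scoreToHist : Prop := ∀ (score : Int) (length_hist : Int) (max_valence : Int), Dom_scoreToHist score length_hist max_valence → Pre_scoreToHist score length_hist max_valence → Spec_scoreToHist score length_hist max_valence (scoreToHist score length_hist max_valence)

-- ===== LEMMAS AND PROOFS =====

-- A's first loop appends its digits in front of whatever accumulator it is given.
theorem pvALoop1_append (fuel : Nat) : ∀ (s b : Int) (rem : List Int),
    pvALoop1 fuel s b rem = pvALoop1 fuel s b [] ++ rem := by
  induction fuel with
  | zero => intro s b rem; simp [pvALoop1]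
  | succ f ih =>
    intro s b rem
    by_cases h : s > 0
    · simp only [pvALoop1, if_pos h]
      rw [ih _ _ (PySem.Int.mod s b :: rem), ih _ _ [PySem.Int.mod s b]]
      simp
    · simp [pvALoop1, if_neg h]

theorem pvBCount_nonneg (fuel : Nat) : ∀ (s b : Int), 0 ≤ pvBCount fuel s b := by
  induction fuel with
  | zero => intro s b; simp [pvBCount]
  | succ f ih =>
    intro s b
    by_cases h : s > 0
    · simp only [pvBCount, if_pos h]; have := ih (PySem.Int.floordiv s b) b; omega
    · simp [pvBCount, if_neg h]

theorem pvALoop1_stop (fuel : Nat) (s b : Int) (rem : List Int) (h : ¬ s > 0) :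
    pvALoop1 fuel s b rem = rem := by
  cases fuel <;> simp [pvALoop1, h]

theorem pvBCount_stop (fuel : Nat) (s b : Int) (h : ¬ s > 0) : pvBCount fuel s b = 0 := by
  cases fuel <;> simp [pvBCount, h]

theorem pvALoop1_length (fuel : Nat) : ∀ (s b : Int),
    ((pvALoop1 fuel s b []).length : Int) = pvBCount fuel s b := by
  induction fuel with
  | zero => intro s b; simp [pvALoop1, pvBCount]
  | succ f ih =>
    intro s b
    by_cases h : s > 0
    · simp only [pvALoop1, pvBCount, if_pos h]
      rw [pvALoop1_append]
      simp [ih]; ring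
    · simp [pvALoop1, pvBCount, if_neg h]

-- A's second loop is zero padding up to length_hist.
theorem pvALoop2_eq (length_hist : Int) (rem : List Int) :
    pvALoop2 length_hist rem = List.replicate (length_hist - rem.length).toNat 0 ++ rem := by
  fun_induction pvALoop2 length_hist rem with
  | case1 rem h ih =>
    rw [ih]
    have hc : (length_hist - (0 :: rem).length : Int).toNat + 1 = (length_hist - rem.length).toNat := by
      simp; omega
    rw [← hc, List.replicate_succ']
    simp
  | case2 rem h =>
    have hc : (length_hist - rem.length : Int).toNat = 0 := by omega
    simp [hc]

-- core digit lemma: with base ≥ 2, B's positional comprehension over t ≥ ndigits slots yields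
-- A's digit list padded with zeros in front.
theorem pvCore (b : Int) (hb : 2 ≤ b) (fuel : Nat) : ∀ (s : Int), 0 ≤ s → s.toNat ≤ fuel →
    ∀ (t : Nat), (pvBCount fuel s b).toNat ≤ t →
    (PySem.List.pyRange 0 (t : Int) 1).map
      (fun i => PySem.Int.mod (PySem.Int.floordiv s (b ^ ((t : Int) - 1 - i).toNat)) b)
    = List.replicate (t - (pvBCount fuel s b).toNat) 0 ++ pvALoop1 fuel s b [] := by
  induction fuel with
  | zero =>
    intro s hs hf t ht
    have hs0 : s = 0 := by omega
    subst hs0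
    simp [pvBCount, pvALoop1]
    rw [PySem.List.pyRange_one]
    refine List.eq_replicate_iff.mpr ⟨by simp, ?_⟩
    intro x hx
    simp at hx
    obtain ⟨k, hk, rfl⟩ := hx
    simp [PySem.Int.floordiv, PySem.Int.mod, Int.zero_fdiv, Int.zero_fmod]
  | succ f ih =>
    intro s hs hf t ht
    by_cases hpos : s > 0
    · -- s > 0 : peel the last slot
      have hdivpos : 0 < b := by omega
      have hfd : PySem.Int.floordiv s b = s / b := PySem.Int.floordiv_eq_ediv_of_pos hdivpos
      have hs' : 0 ≤ s / b := Int.ediv_nonneg hs (le_of_lt hdivpos)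
      have hlt : s / b < s := by
        rw [Int.ediv_lt_iff_lt_mul (by omega : (0:Int) < b)]
        nlinarith
      have hf' : (s / b).toNat ≤ f := by omega
      have hcnt : pvBCount (f+1) s b = 1 + pvBCount f (s / b) b := by
        simp [pvBCount, if_pos hpos, hfd]
      have hc0 := pvBCount_nonneg f (s / b) b
      have ht1 : 1 ≤ t := by rw [hcnt] at ht; omega
      obtain ⟨t', rfl⟩ : ∃ t', t = t' + 1 := ⟨t - 1, by omega⟩
      have ht' : (pvBCount f (s / b) b).toNat ≤ t' := by rw [hcnt] at ht; omega
      -- split range(t'+1) = range(t') ++ [t']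
      have hsplit : PySem.List.pyRange 0 ((t' : Int) + 1) 1
          = PySem.List.pyRange 0 (t' : Int) 1 ++ [(t' : Int)] := by
        exact PySem.List.pyRange_one_succ_right (by positivity)
      have hcast : ((t' + 1 : Nat) : Int) = (t' : Int) + 1 := by push_cast; ring
      rw [hcast, hsplit, List.map_append]
      -- last slot is s % b
      have hlast : (((t' : Int) + 1) - 1 - (t' : Int)).toNat = 0 := by omega
      -- the first t' slots are the digits of s / b
      have hbody : (PySem.List.pyRange 0 (t' : Int) 1).map
            (fun i => PySem.Int.mod (PySem.Int.floordiv s (b ^ (((t' : Int) + 1) - 1 - i).toNat)) b)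
          = (PySem.List.pyRange 0 (t' : Int) 1).map
            (fun i => PySem.Int.mod (PySem.Int.floordiv (s / b) (b ^ ((t' : Int) - 1 - i).toNat)) b) := by
        apply List.map_congr_left
        intro i hi
        rw [PySem.List.mem_pyRange_one] at hi
        obtain ⟨hi0, hit⟩ := hi
        have he : (((t' : Int) + 1) - 1 - i).toNat = ((t' : Int) - 1 - i).toNat + 1 := by omega
        rw [he]
        have hpow : 0 < b ^ (((t' : Int) - 1 - i).toNat) := by positivity
        rw [PySem.Int.floordiv_eq_ediv_of_pos (by positivity), PySem.Int.floordiv_eq_ediv_of_pos hpow]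
        congr 1
        rw [pow_succ, mul_comm]
        exact (Int.ediv_ediv_of_nonneg (le_of_lt hdivpos)).symm
      rw [hbody, ih (s / b) hs' hf' t' ht']
      have hstep : pvALoop1 (f+1) s b [] = pvALoop1 f (s / b) b [] ++ [PySem.Int.mod s b] := by
        simp only [pvALoop1, if_pos hpos, hfd]
        exact pvALoop1_append f (s / b) b [PySem.Int.mod s b]
      rw [hstep, hcnt]
      simp only [List.map_cons, List.map_nil]
      rw [hlast, pow_zero, PySem.Int.floordiv_eq_ediv_of_pos Int.one_pos, Int.ediv_one]
      have hcc : (t' + 1) - (1 + pvBCount f (s / b) b).toNat = t' - (pvBCount f (s / b) b).toNat := by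
        omega
      rw [hcc]
      simp [List.append_assoc]
    · -- s = 0
      have hs0 : s = 0 := by omega
      subst hs0
      simp [pvBCount, pvALoop1]
      rw [PySem.List.pyRange_one]
      refine List.eq_replicate_iff.mpr ⟨by simp, ?_⟩
      intro x hx
      simp at hx
      obtain ⟨k, hk, rfl⟩ := hx
      simp [PySem.Int.floordiv, PySem.Int.mod, Int.zero_fdiv, Int.zero_fmod]

-- ===== VERDICT (by name: the statement is the Claim_ definition above) =====
theorem scoreToHist_spec : Claim_equal_scoreToHist := by
  intro score lh mv _ hpre
  show pvALoop2 lh (pvALoop1 score.toNat score (mv+1) []) =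
    List.replicate (max (pvBCount score.toNat score (mv+1)) lh - pvBCount score.toNat score (mv+1)).toNat 0 ++
      (PySem.List.pyRange 0 (pvBCount score.toNat score (mv+1)) 1).map
        (fun i => PySem.Int.mod (PySem.Int.floordiv (max score 0) ((mv+1) ^ (pvBCount score.toNat score (mv+1) - 1 - i).toNat)) (mv+1))
  rw [pvALoop2_eq]
  by_cases hpos : score > 0
  · have hmax0 : max score 0 = score := by omega
    have hbne : mv + 1 ≠ 0 ∧ mv + 1 ≠ 1 := by rcases hpre with h | h <;> omega
    have hlen := pvALoop1_length score.toNat score (mv+1)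
    by_cases hb : 2 ≤ mv + 1
    · -- base ≥ 2 : the general digit lemma, taken with exactly ndigits slots
      have hc0 := pvBCount_nonneg score.toNat score (mv+1)
      have hcc : pvBCount score.toNat score (mv+1)
          = (((pvBCount score.toNat score (mv+1)).toNat : Nat) : Int) := by omega
      rw [hmax0, hcc,
        pvCore (mv+1) hb score.toNat score (by omega) (le_refl _)
          (pvBCount score.toNat score (mv+1)).toNat (le_refl _)]
      simp only [Nat.sub_self, List.replicate_zero, List.nil_append]
      congr 1
      congr 1
      omega
    · -- base ≤ -1 : A's loop runs exactly once (the quotient turns non-positive)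
      have hbneg : mv + 1 < 0 := by omega
      obtain ⟨f, hf⟩ : ∃ f, score.toNat = f + 1 := ⟨score.toNat - 1, by omega⟩
      have hmb := PySem.Int.mod_neg_bounds (a := score) hbneg
      have hdm := PySem.Int.floordiv_mul_add_mod score (mv+1)
      have hq : ¬ PySem.Int.floordiv score (mv+1) > 0 := by nlinarith [hmb.2, hdm]
      have hcnt : pvBCount score.toNat score (mv+1) = 1 := by
        rw [hf]
        simp only [pvBCount, if_pos hpos]
        rw [pvBCount_stop f _ (mv+1) hq]
        norm_num
      have hdig : pvALoop1 score.toNat score (mv+1) [] = [PySem.Int.mod score (mv+1)] := by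
        rw [hf]
        simp only [pvALoop1, if_pos hpos]
        exact pvALoop1_stop f _ (mv+1) _ hq
      rw [hdig, hcnt, hmax0]
      have hr1 : PySem.List.pyRange 0 1 1 = [(0 : Int)] := by decide
      rw [hr1]
      simp only [List.map_cons, List.map_nil]
      have he0 : ((1 : Int) - 1 - 0).toNat = 0 := by omega
      rw [he0, pow_zero, PySem.Int.floordiv_eq_ediv_of_pos Int.one_pos, Int.ediv_one]
      congr 1
      congr 1
      simp
      omega
  · -- score ≤ 0 : A pads zeros only; B's digit comprehension is empty
    have hfuel : score.toNat = 0 := by omega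
    rw [hfuel]
    rw [show pvBCount 0 score (mv+1) = 0 from by simp [pvBCount]]
    simp only [pvALoop1]
    have hr0 : PySem.List.pyRange 0 0 1 = ([] : List Int) := by decide
    rw [hr0]
    simp
    omega
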